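-- pv_equiv track=rewrite | github.com/AndryRafam/Algo-Dojo | String/AnagramPalindrome.py | check
-- ===== SOURCE A (Python) =====
-- from collections import Counter
--
-- def check(s:str)->bool:
--     h = Counter(s)
--     c = 0
--     for (key,val) in h.items():
--         if(val==1):
--             c+=1
--     res = "YES" if(c==1) else "NO"
--     return res
-- ===== SOURCE B (Python) =====
-- def check(s: str) -> str:
--     t = sorted(s)
--     ones = 0
--     while t:
--         c = t[0]
--         run = 1
--         while run < len(t) and t[run] == c:
--             run += 1
--         if run == 1:
--             ones += 1
--         t = t[run:]
--     return "YES" if ones == 1 else "NO"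
-- ===== Notes on version B (the rewrite author's own statement) =====
-- stated objective: alternative
-- what changed: Replaced the Counter hash tally plus items scan by sort-then-run-scan: sort the characters and count length-1 runs of equal characters in one pass over the sorted list.
import Mathlib
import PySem

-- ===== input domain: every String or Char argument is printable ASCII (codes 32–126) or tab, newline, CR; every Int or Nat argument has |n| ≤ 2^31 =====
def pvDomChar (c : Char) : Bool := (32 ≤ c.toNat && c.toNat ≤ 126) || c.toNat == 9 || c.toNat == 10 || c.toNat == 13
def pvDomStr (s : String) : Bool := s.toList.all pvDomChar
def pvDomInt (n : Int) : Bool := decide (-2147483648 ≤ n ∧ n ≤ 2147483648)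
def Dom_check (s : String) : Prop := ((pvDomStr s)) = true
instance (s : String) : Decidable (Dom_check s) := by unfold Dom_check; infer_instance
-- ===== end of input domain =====

-- B replaces the Counter tally by sorting the characters and counting length-1 runs in one scan (alternative algorithm, same result).

-- ===== PORT A =====
def check (s : String) : String :=
  let h := PySem.Dict.counter s.toList
  let c := h.items.foldl (fun c kv => if kv.2 == 1 then c + 1 else c) (0 : Int)
  if c == 1 then "YES" else "NO"

-- ===== PORT B =====
-- the outer while loop of Source B: count length-1 runs of equal chars (run = 1 + length of takeWhile over the tail)
def pvCountRuns : List Char → Int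
  | [] => 0
  | c :: rest =>
      let run := (rest.takeWhile (fun x => x == c)).length + 1
      (if run == 1 then pvCountRuns (rest.drop (run - 1)) + 1 else pvCountRuns (rest.drop (run - 1)))
  termination_by t => t.length
  decreasing_by
    all_goals rw [List.length_drop, List.length_cons]; omega

def check_alt (s : String) : String :=
  let t := PySem.List.sorted s.toList (fun x => x) false
  let ones := pvCountRuns t
  if ones == 1 then "YES" else "NO"

-- ===== PRECONDITION & SPEC =====
def Spec_check (s : String) (out : String) : Prop := out = check_alt s
instance (s : String) (out : String) : Decidable (Spec_check s out) := by unfold Spec_check; infer_instance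

-- ===== CLAIM (what is proved, stated in full; the proofs are below) =====
def Claim_equal_check : Prop := ∀ (s : String), Dom_check s → Spec_check s (check s)

-- ===== LEMMAS AND PROOFS =====

-- after dropping the first maximal run, the next element (if any) fails the predicate
theorem pvTakeWhile_drop (p : Char → Bool) : ∀ (l : List Char),
    (l.drop (l.takeWhile p).length).takeWhile p = []
  | [] => rfl
  | a :: l => by
    by_cases h : p a
    · simp [h, pvTakeWhile_drop p l]
    · simp [h]

theorem pvCastBeq (n : Nat) : (((n : Int)) == 1) = (n == 1) := by
  by_cases h : n = 1
  · simp [h]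
  · simp [h, Nat.cast_eq_one]

-- In a (≤)-sorted list, pvCountRuns counts the distinct chars occurring exactly once.
theorem pvCountRuns_eq : ∀ (t : List Char), t.Pairwise (· ≤ ·) →
    pvCountRuns t = (((PySem.Set.ofList t).countP (fun k => t.count k == 1) : Nat) : Int)
  | [], _ => by simp [pvCountRuns, PySem.Set.ofList]
  | c :: rest, h => by
    obtain ⟨u, hu⟩ := (List.takeWhile_prefix (l := rest) (p := fun x => x == c))
    have hrest' : rest.drop (rest.takeWhile (fun x => x == c)).length = u := by
      have hdl := List.drop_left (l₁ := rest.takeWhile (fun x => x == c)) (l₂ := u)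
      rwa [hu] at hdl
    have hrunmem : ∀ x ∈ rest.takeWhile (fun x => x == c), x = c := by
      intro x hx
      have := List.mem_takeWhile_imp hx
      simpa using this
    have htw : u.takeWhile (fun x => x == c) = [] := by
      have := pvTakeWhile_drop (fun x => x == c) rest
      rwa [hrest'] at this
    have hle : ∀ x ∈ rest, c ≤ x := (List.pairwise_cons.mp h).1
    have hpair_rest : rest.Pairwise (· ≤ ·) := (List.pairwise_cons.mp h).2
    have hpair' : u.Pairwise (· ≤ ·) := by
      rw [← hrest']; exact hpair_rest.sublist (List.drop_sublist _ _)
    have hcnot : c ∉ u := by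
      cases hr : u with
      | nil => simp
      | cons d tl =>
        have hd : ¬ ((d == c) = true) := by
          intro hdc
          rw [hr, List.takeWhile_cons, if_pos hdc] at htw
          exact List.cons_ne_nil _ _ htw
        have hdne : d ≠ c := by simpa using hd
        have hdmem : d ∈ rest := by rw [← hu, hr]; simp
        have hcd : c < d := lt_of_le_of_ne (hle d hdmem) (fun e => hdne e.symm)
        intro hc
        rcases List.mem_cons.mp hc with e | hctl
        · exact hdne e.symm
        · have hdx : d ≤ c := by
            have := (List.pairwise_cons.mp (by rwa [hr] at hpair')).1
            exact this c hctl
          exact absurd hdx (not_le.mpr hcd)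
    have hcntrun : (rest.takeWhile (fun x => x == c)).count c
        = (rest.takeWhile (fun x => x == c)).length :=
      List.count_eq_length.mpr (fun b hb => (hrunmem b hb).symm)
    have hcount_c : (c :: rest).count c = (rest.takeWhile (fun x => x == c)).length + 1 := by
      have h2 : rest.count c = (rest.takeWhile (fun x => x == c)).length := by
        conv_lhs => rw [← hu]
        simp [List.count_append, hcntrun, List.count_eq_zero.mpr hcnot]
      rw [List.count_cons_self, h2]
    have hcount_ne : ∀ k, k ≠ c → (c :: rest).count k = u.count k := by
      intro k hk
      have hkrun : k ∉ rest.takeWhile (fun x => x == c) := fun hmem => hk (hrunmem k hmem)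
      have h1 : rest.count k = u.count k := by
        conv_lhs => rw [← hu]
        simp [List.count_append, List.count_eq_zero.mpr hkrun]
      rw [List.count_cons, h1]
      simp [Ne.symm hk]
    have hmem : ∀ x, x ∈ (c :: rest) ↔ x = c ∨ x ∈ u := by
      intro x
      constructor
      · intro hx
        rcases List.mem_cons.mp hx with e | hx
        · exact Or.inl e
        · rw [← hu] at hx
          rcases List.mem_append.mp hx with hx | hx
          · exact Or.inl (hrunmem x hx)
          · exact Or.inr hx
      · intro hx
        rcases hx with e | hx
        · exact e ▸ List.mem_cons_self
        · refine List.mem_cons_of_mem _ ?_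
          rw [← hu]; exact List.mem_append_right _ hx
    have hperm : List.Perm (PySem.Set.ofList (c :: rest)) (c :: PySem.Set.ofList u) := by
      refine (List.perm_ext_iff_of_nodup (PySem.Set.nodup_ofList _) ?_).mpr ?_
      · exact List.nodup_cons.mpr ⟨by simpa [PySem.Set.mem_ofList] using hcnot,
          PySem.Set.nodup_ofList _⟩
      · intro a
        simp only [PySem.Set.mem_ofList, List.mem_cons, hmem a]
    have IH : pvCountRuns u = (((PySem.Set.ofList u).countP (fun k => u.count k == 1) : Nat) : Int) :=
      pvCountRuns_eq u hpair'
    have hcongr : (PySem.Set.ofList u).countP (fun k => (c :: rest).count k == 1)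
        = (PySem.Set.ofList u).countP (fun k => u.count k == 1) := by
      refine List.countP_congr ?_
      intro a ha
      have hane : a ≠ c := by
        intro e; exact hcnot (e ▸ (PySem.Set.mem_ofList _ _).mp ha)
      rw [hcount_ne a hane]
    have hRHS : (PySem.Set.ofList (c :: rest)).countP (fun k => (c :: rest).count k == 1)
        = (PySem.Set.ofList u).countP (fun k => u.count k == 1)
          + (if (rest.takeWhile (fun x => x == c)).length = 0 then 1 else 0) := by
      rw [hperm.countP_eq, List.countP_cons, hcongr, hcount_c]
      by_cases h0 : (rest.takeWhile (fun x => x == c)).length = 0 <;> simp [h0]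
    rw [hRHS]
    show pvCountRuns (c :: rest) = _
    rw [pvCountRuns]
    simp only [Nat.add_sub_cancel, hrest']
    by_cases h0 : (rest.takeWhile (fun x => x == c)).length = 0
    · simp [h0, IH]
    · have : ¬ ((rest.takeWhile (fun x => x == c)).length + 1 == 1) = true := by
        simpa using h0
      simp [h0, this, IH]
  termination_by t => t.length
  decreasing_by
    rw [← hrest']
    simp only [List.length_drop, List.length_cons]
    omega

-- ===== VERDICT (by name: the statement is the Claim_ definition above) =====
theorem check_spec : Claim_equal_check := by
  intro s _
  simp only [Spec_check, check, check_alt]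
  have hpw : (PySem.List.sorted s.toList (fun x => x) false).Pairwise (· ≤ ·) :=
    PySem.List.sorted_pairwise _ _
  rw [pvCountRuns_eq _ hpw, PySem.Dict.items_counter, PySem.List.foldl_if_add_one]
  have hcnt : ∀ k, (PySem.List.sorted s.toList (fun x => x) false).count k = s.toList.count k :=
    fun k => List.Perm.count_eq (PySem.List.sorted_perm _ _ _) k
  have hsetperm : List.Perm (PySem.Set.ofList (PySem.List.sorted s.toList (fun x => x) false))
      (PySem.Set.ofList s.toList) := by
    refine (List.perm_ext_iff_of_nodup (PySem.Set.nodup_ofList _) (PySem.Set.nodup_ofList _)).mpr ?_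
    intro a
    simp [PySem.Set.mem_ofList, PySem.List.mem_sorted]
  have hA : ((PySem.Set.ofList s.toList).map (fun k => (k, (s.toList.count k : Int)))).countP
        (fun kv => kv.2 == 1)
      = (PySem.Set.ofList s.toList).countP (fun k => s.toList.count k == 1) := by
    rw [List.countP_map]
    refine List.countP_congr ?_
    intro a _
    simp only [Function.comp_apply]
    rw [pvCastBeq]
  have hB : (PySem.Set.ofList (PySem.List.sorted s.toList (fun x => x) false)).countP
        (fun k => (PySem.List.sorted s.toList (fun x => x) false).count k == 1)
      = (PySem.Set.ofList s.toList).countP (fun k => s.toList.count k == 1) := by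
    rw [show (fun k => (PySem.List.sorted s.toList (fun x => x) false).count k == 1)
        = (fun k => s.toList.count k == 1) from funext (fun k => by rw [hcnt k]),
      hsetperm.countP_eq]
  rw [hA, hB]
  simp
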